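-- pv_equiv track=rewrite | github.com/ManuelaRosina/TxMM_Project | classifier.py | other_metrics
-- ===== SOURCE A (Python) =====
-- def other_metrics(message, bag_of_words):
--     features = []
--     nr_of_words = len(bag_of_words)
--     features.append(nr_of_words)
--
--     # number of alphabetical and nonalphabetical characters
--     features.append(sum([1 for x in message if x.isalpha()]))
--     features.append(sum([1 for x in message if not x.isalpha()]))
--
--     # count all uppercase words and words starting with an uppercase letter
--     features.append(sum([1 for x in bag_of_words if x.isupper()]))
--     features.append(sum([1 for x in bag_of_words if x[0].isupper()]))
--
--     return features
-- ===== SOURCE B (Python) =====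
-- def other_metrics(message, bag_of_words):
--     # Map each word / character to a 5-component feature-contribution vector,
--     # then reduce: the answer is the columnwise sum of all the vectors.
--     zero = (0, 0, 0, 0, 0)
--     word_rows = [(1, 0, 0, int(w.isupper()), int(w[0].isupper())) for w in bag_of_words]
--     char_rows = [(0, 1, 0, 0, 0) if c.isalpha() else (0, 0, 1, 0, 0) for c in message]
--     return [sum(col) for col in zip(*([zero] + word_rows + char_rows))]
-- ===== Notes on version B (the rewrite author's own statement) =====
-- stated objective: alternative
-- what changed: Instead of computing each feature with its own filtering comprehension, B maps every word and character to a 5-component feature-contribution vector and obtains the result as the columnwise sum of those vectors via zip-transpose (seeded with a zero vector so empty input still yields five zeros).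
-- outside the precondition, e.g. on other_metrics('a', ['']): A raises IndexError, B raises IndexError
import Mathlib
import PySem

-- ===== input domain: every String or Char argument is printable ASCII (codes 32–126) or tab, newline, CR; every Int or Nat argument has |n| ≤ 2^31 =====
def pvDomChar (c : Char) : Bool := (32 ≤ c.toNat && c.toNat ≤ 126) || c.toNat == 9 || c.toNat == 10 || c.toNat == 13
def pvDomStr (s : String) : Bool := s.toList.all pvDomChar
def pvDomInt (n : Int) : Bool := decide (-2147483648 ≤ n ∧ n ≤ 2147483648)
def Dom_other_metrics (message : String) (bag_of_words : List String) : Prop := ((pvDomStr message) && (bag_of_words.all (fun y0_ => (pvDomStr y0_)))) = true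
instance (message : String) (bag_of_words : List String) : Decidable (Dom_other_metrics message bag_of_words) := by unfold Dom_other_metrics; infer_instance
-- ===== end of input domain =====

-- B maps each word/character to a 5-component feature-contribution vector and sums
-- the vectors columnwise (map/reduce), instead of A's four filtering comprehensions.

-- ===== PORT A =====
-- Python's str.isupper() on ASCII: at least one letter, and no lowercase letter.
def pyStrIsupper (cs : List Char) : Bool :=
  cs.any (fun c => PySem.Chars.isalpha c) && cs.all (fun c => !PySem.Chars.islower c)

-- x[0].isupper(); the none case (empty word, IndexError in Python) is excluded by Pre_.
def pyFirstIsupper (x : String) : Bool :=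
  match PySem.List.pyGet? x.toList 0 with
  | some c => PySem.Chars.isupper c
  | none => false

def other_metrics (message : String) (bag_of_words : List String) : List Int :=
  let features : List Int := []
  let nr_of_words : Int := bag_of_words.length
  let features := features ++ [nr_of_words]
  let features := features ++
    [((message.toList.filter (fun x => PySem.Chars.isalpha x)).map (fun _ => (1 : Int))).sum]
  let features := features ++
    [((message.toList.filter (fun x => !PySem.Chars.isalpha x)).map (fun _ => (1 : Int))).sum]
  let features := features ++
    [((bag_of_words.filter (fun x => pyStrIsupper x.toList)).map (fun _ => (1 : Int))).sum]
  let features := features ++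
    [((bag_of_words.filter (fun x => pyFirstIsupper x)).map (fun _ => (1 : Int))).sum]
  features

-- ===== PORT B =====
def other_metrics_alt (message : String) (bag_of_words : List String) : List Int :=
  let zero : Int × Int × Int × Int × Int := (0, 0, 0, 0, 0)
  let word_rows := bag_of_words.map (fun w =>
    ((1 : Int), (0 : Int), (0 : Int),
     (if pyStrIsupper w.toList then (1 : Int) else 0),
     (if pyFirstIsupper w then (1 : Int) else 0)))
  let char_rows := message.toList.map (fun c =>
    if PySem.Chars.isalpha c then ((0 : Int), (1 : Int), (0 : Int), (0 : Int), (0 : Int))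
    else ((0 : Int), (0 : Int), (1 : Int), (0 : Int), (0 : Int)))
  let rows := [zero] ++ word_rows ++ char_rows
  -- zip(*rows) then sum each column:
  [ (rows.map (fun r => r.1)).sum,
    (rows.map (fun r => r.2.1)).sum,
    (rows.map (fun r => r.2.2.1)).sum,
    (rows.map (fun r => r.2.2.2.1)).sum,
    (rows.map (fun r => r.2.2.2.2)).sum ]

-- ===== PRECONDITION & SPEC =====
-- Pre_ excludes bags containing an empty word, on which both Pythons raise IndexError at x[0].
def Pre_other_metrics (message : String) (bag_of_words : List String) : Prop :=
  (bag_of_words.all (fun x => x ≠ "")) = true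
instance (message : String) (bag_of_words : List String) : Decidable (Pre_other_metrics message bag_of_words) := by unfold Pre_other_metrics; infer_instance
def pvWitness_other_metrics : String × List String := ("Hi there!", ["Hi", "THERE", "x"])
def Spec_other_metrics (message : String) (bag_of_words : List String) (out : List Int) : Prop := out = other_metrics_alt message bag_of_words
instance (message : String) (bag_of_words : List String) (out : List Int) : Decidable (Spec_other_metrics message bag_of_words out) := by unfold Spec_other_metrics; infer_instance

-- ===== CLAIM (what is proved, stated in full; the proofs are below) =====
def Claim_equal_other_metrics : Prop := ∀ (message : String) (bag_of_words : List String), Dom_other_metrics message bag_of_words → Pre_other_metrics message bag_of_words → Spec_other_metrics message bag_of_words (other_metrics message bag_of_words)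

-- ===== LEMMAS AND PROOFS =====
theorem sum_ones_filter {α : Type} (p : α → Bool) (l : List α) :
    ((l.filter p).map (fun _ => (1 : Int))).sum = (l.countP p : Int) := by
  induction l with
  | nil => simp
  | cons x xs ih =>
    by_cases h : p x <;>
      simp [List.countP_cons, List.countP_eq_length_filter, h, ih] <;>
      push_cast <;> omega

theorem filter_eta {α : Type} (p : α → Bool) (l : List α) :
    l.filter (fun x => p x) = l.filter p := rfl

theorem sum_ite01 {α : Type} (p : α → Bool) (l : List α) :
    (l.map (fun x => if p x then (1 : Int) else 0)).sum = (l.countP p : Int) := by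
  induction l with
  | nil => simp
  | cons x xs ih =>
    by_cases h : p x <;> simp [List.countP_cons, h, ih] <;> push_cast <;> omega

theorem sum_ite10 {α : Type} (p : α → Bool) (l : List α) :
    (l.map (fun x => if p x then (0 : Int) else 1)).sum = (l.countP (fun x => !p x) : Int) := by
  induction l with
  | nil => simp
  | cons x xs ih =>
    by_cases h : p x <;> simp [List.countP_cons, h, ih] <;> push_cast <;> omega

theorem sum_const_one {α : Type} (l : List α) :
    (l.map (fun _ => (1 : Int))).sum = (l.length : Int) := by
  induction l with
  | nil => simp
  | cons x xs ih => simp [ih]; push_cast; omega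

theorem sum_const_zero {α : Type} (l : List α) :
    (l.map (fun _ => (0 : Int))).sum = 0 := by
  induction l with
  | nil => simp
  | cons x xs ih => simp [ih]

-- ===== VERDICT (by name: the statement is the Claim_ definition above) =====
theorem other_metrics_spec : Claim_equal_other_metrics := by
  intro message bag_of_words _ _
  unfold Spec_other_metrics other_metrics other_metrics_alt
  simp only [List.map_append, List.map_map, List.sum_append, List.nil_append,
    List.cons_append, List.singleton_append, List.map_cons, List.map_nil,
    List.sum_cons, List.sum_nil, Function.comp_def,
    sum_ones_filter, sum_const_one, sum_const_zero]
  simp only [apply_ite]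
  simp only [ite_self, sum_ite01, sum_ite10, sum_const_one, sum_const_zero,
    List.countP_eq_length_filter, filter_eta, List.cons.injEq]
  refine ⟨by push_cast; omega, by push_cast; omega, by push_cast; omega,
    by push_cast; omega, by push_cast; omega, trivial⟩
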